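-- pv_equiv track=rewrite | github.com/u6yuvi/Algorithms | courses/algorithms/sliding_window/problems.py | diet_plan
-- ===== SOURCE A (Python) =====
-- def diet_plan(arr,k,lower,upper):
--     window_sum = sum(arr[0:k])
--     global_cnt = 0
--     if window_sum>upper:
--         global_cnt+=1
--     elif window_sum<lower:
--         global_cnt-=1
--
--     for i in range(k,len(arr)):
--         window_sum+=arr[i]-arr[i-k]
--         if window_sum>upper:
--             global_cnt+=1
--         elif window_sum<lower:
--             global_cnt-=1
--     return global_cnt
-- ===== SOURCE B (Python) =====
-- def diet_plan(arr, k, lower, upper):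
--     prefix = [0]
--     for x in arr:
--         prefix.append(prefix[-1] + x)
--     total = 0
--     for start in range(len(arr) - k + 1):
--         s = prefix[start + k] - prefix[start]
--         if s > upper:
--             total += 1
--         elif s < lower:
--             total -= 1
--     return total
-- ===== Notes on version B (the rewrite author's own statement) =====
-- stated objective: alternative
-- what changed: Replaces A's single stateful sliding-window pass (running window_sum updated in place) by a prefix-sum array built once, after which each window sum is computed independently as prefix[start+k]-prefix[start] over window start positions; Pre_ excludes k < 0 (A raises IndexError) and k > len(arr), where A's counting of one clamped whole-array window is an artefact of slicing and B counts zero size-k windows, both defensible on that corner.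
-- outside the precondition, e.g. on diet_plan([1, 2], 5, 0, 1): A returns 1, B returns 0; on diet_plan([1, 2], -1, 0, 1): A raises IndexError, B raises IndexError
import Mathlib
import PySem

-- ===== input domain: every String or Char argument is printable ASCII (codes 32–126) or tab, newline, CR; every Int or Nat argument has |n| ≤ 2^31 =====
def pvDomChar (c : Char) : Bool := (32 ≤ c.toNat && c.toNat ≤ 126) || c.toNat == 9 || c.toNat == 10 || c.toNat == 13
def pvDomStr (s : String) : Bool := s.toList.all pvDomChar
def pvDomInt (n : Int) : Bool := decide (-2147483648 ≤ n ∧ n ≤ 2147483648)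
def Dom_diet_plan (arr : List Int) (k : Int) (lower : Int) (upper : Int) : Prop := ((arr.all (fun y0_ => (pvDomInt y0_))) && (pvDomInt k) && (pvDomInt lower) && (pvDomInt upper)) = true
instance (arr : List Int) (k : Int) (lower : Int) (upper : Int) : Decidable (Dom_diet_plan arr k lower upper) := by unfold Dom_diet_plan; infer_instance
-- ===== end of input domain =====

-- B replaces the stateful sliding-window update by a prefix-sum array with per-window subtraction (alternative decomposition, same cost).

-- ===== PORT A =====
-- pyGetD is exact here: under Pre_ (0 ≤ k ≤ len arr) every index i, i-k of the loop is in range.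
def diet_plan (arr : List Int) (k : Int) (lower : Int) (upper : Int) : Int :=
  let ws0 := (PySem.List.slice arr (some 0) (some k)).sum
  let c0 : Int := if ws0 > upper then 1 else if ws0 < lower then -1 else 0
  let st := (PySem.List.pyRange k (arr.length : Int) 1).foldl
    (fun (s : Int × Int) i =>
      let w := s.1 + PySem.List.pyGetD arr i 0 - PySem.List.pyGetD arr (i - k) 0
      (w, if w > upper then s.2 + 1 else if w < lower then s.2 - 1 else s.2))
    (ws0, c0)
  st.2

-- ===== PORT B =====
-- prefix-sum list: dietPrefix acc xs = [acc, acc+xs0, acc+xs0+xs1, …]  (Source B's cumulative append loop)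
def dietPrefix (acc : Int) : List Int → List Int
  | [] => [acc]
  | x :: xs => acc :: dietPrefix (acc + x) xs

def diet_plan_alt (arr : List Int) (k : Int) (lower : Int) (upper : Int) : Int :=
  let p := dietPrefix 0 arr
  (PySem.List.pyRange 0 ((arr.length : Int) - k + 1) 1).foldl
    (fun (total : Int) start =>
      let s := PySem.List.pyGetD p (start + k) 0 - PySem.List.pyGetD p start 0
      if s > upper then total + 1 else if s < lower then total - 1 else total)
    0

-- ===== PRECONDITION & SPEC =====
-- Pre_ excludes k < 0 (A raises IndexError in its loop) and k > len(arr), a corner where A's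
-- single clamped whole-array window is an artefact of slicing and B's zero windows is equally defensible.
def Pre_diet_plan (arr : List Int) (k : Int) (lower : Int) (upper : Int) : Prop := 0 ≤ k ∧ k ≤ (arr.length : Int)
instance (arr : List Int) (k : Int) (lower : Int) (upper : Int) : Decidable (Pre_diet_plan arr k lower upper) := by unfold Pre_diet_plan; infer_instance
def pvWitness_diet_plan : List Int × Int × Int × Int := ([1, 2, 3, 4], 2, 2, 6)

def Spec_diet_plan (arr : List Int) (k : Int) (lower : Int) (upper : Int) (out : Int) : Prop := out = diet_plan_alt arr k lower upper
instance (arr : List Int) (k : Int) (lower : Int) (upper : Int) (out : Int) : Decidable (Spec_diet_plan arr k lower upper out) := by unfold Spec_diet_plan; infer_instance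

-- ===== CLAIM (what is proved, stated in full; the proofs are below) =====
def Claim_equal_diet_plan : Prop := ∀ (arr : List Int) (k : Int) (lower : Int) (upper : Int), Dom_diet_plan arr k lower upper → Pre_diet_plan arr k lower upper → Spec_diet_plan arr k lower upper (diet_plan arr k lower upper)

-- ===== LEMMAS AND PROOFS =====

def dietScore (lower upper s : Int) : Int :=
  if s > upper then 1 else if s < lower then -1 else 0

-- P j = sum of the first j elements
def dietP (arr : List Int) (j : Nat) : Int := (arr.take j).sum

lemma dietP_def (arr : List Int) (j : Nat) : (arr.take j).sum = dietP arr j := rfl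

lemma dietPrefix_getD (arr : List Int) (acc : Int) (j : Nat) (hj : j ≤ arr.length) :
    (dietPrefix acc arr).getD j 0 = acc + dietP arr j := by
  induction arr generalizing acc j with
  | nil =>
    have : j = 0 := by simpa using hj
    subst this
    simp [dietPrefix, dietP]
  | cons x xs ih =>
    cases j with
    | zero => simp [dietPrefix, dietP]
    | succ j =>
      simp only [dietPrefix, List.getD_cons_succ]
      rw [ih (acc + x) j (by simpa using hj)]
      simp [dietP, add_assoc]

-- a counting fold with ±1 branches is the running total plus a sum of scores
lemma dietB_fold (lower upper : Int) (f : Int → Int) (l : List Int) (t : Int) :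
    l.foldl
      (fun (total : Int) start =>
        let s := f start
        if s > upper then total + 1 else if s < lower then total - 1 else total) t
    = t + (l.map (fun s => dietScore lower upper (f s))).sum := by
  induction l generalizing t with
  | nil => simp
  | cons x xs ih =>
    simp only [List.foldl_cons, List.map_cons, List.sum_cons, ih]
    unfold dietScore
    split_ifs <;> ring

-- A's fold invariant: after the loop has run up to bound m (k' ≤ m ≤ n), the state is
-- (last window sum, sum of scores of all windows starting at 0 .. m-k').
lemma dietA_fold (arr : List Int) (lower upper : Int) (k' m : Nat)
    (hk : k' ≤ m) (hm : m ≤ arr.length) :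
    (PySem.List.pyRange (k' : Int) (m : Int) 1).foldl
      (fun (s : Int × Int) i =>
        let w := s.1 + PySem.List.pyGetD arr i 0 - PySem.List.pyGetD arr (i - (k' : Int)) 0
        (w, if w > upper then s.2 + 1 else if w < lower then s.2 - 1 else s.2))
      (dietP arr k', dietScore lower upper (dietP arr k'))
    = (dietP arr m - dietP arr (m - k'),
       ((List.range (m - k' + 1)).map
         (fun s => dietScore lower upper (dietP arr (s + k') - dietP arr s))).sum) := by
  induction m with
  | zero =>
    have hk0 : k' = 0 := Nat.le_zero.mp hk
    subst hk0
    rw [PySem.List.pyRange_one_eq_nil (by omega)]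
    simp [dietP]
  | succ m ih =>
    rcases Nat.lt_or_ge m k' with hlt | hge
    · -- k' = m + 1: empty range
      have hk' : k' = m + 1 := by omega
      subst hk'
      rw [PySem.List.pyRange_one_eq_nil (by push_cast; omega)]
      have h1 : m + 1 - (m + 1) = 0 := by omega
      simp [dietP]
    · -- split off the last iteration i = m
      have hmn : m < arr.length := by omega
      have hrange : (PySem.List.pyRange (k' : Int) ((m : Nat) + 1 : Int) 1)
          = PySem.List.pyRange (k' : Int) (m : Int) 1 ++ [(m : Int)] := by
        exact_mod_cast PySem.List.pyRange_one_succ_right (a := (k' : Int)) (b := (m : Int))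
          (by exact_mod_cast hge)
      push_cast
      push_cast at hrange
      rw [hrange, List.foldl_append, ih hge (by omega)]
      have hget1 : PySem.List.pyGetD arr ((m : Nat) : Int) 0 = arr[m] := by
        rw [PySem.List.pyGetD_natCast]; exact List.getD_eq_getElem arr 0 hmn
      have hcast : ((m : Int) - (k' : Int)) = ((m - k' : Nat) : Int) := by push_cast; omega
      have hget2 : PySem.List.pyGetD arr ((m : Int) - (k' : Int)) 0 = arr[m - k'] := by
        rw [hcast, PySem.List.pyGetD_natCast]
        exact List.getD_eq_getElem arr 0 (by omega)
      simp only [List.foldl_cons, List.foldl_nil, hget1, hget2]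
      have hw : dietP arr m - dietP arr (m - k') + arr[m] - arr[m - k']
          = dietP arr (m + 1) - dietP arr (m - k' + 1) := by
        have h1 : dietP arr (m + 1) = dietP arr m + arr[m] := List.sum_take_succ arr m hmn
        have h3 : dietP arr ((m - k') + 1) = dietP arr (m - k') + arr[m - k'] :=
          List.sum_take_succ arr (m - k') (by omega)
        rw [h1, h3]; ring
      have hsum : (m + 1 - k') = (m - k') + 1 := by omega
      have hS : ((List.range (m + 1 - k' + 1)).map
            (fun s => dietScore lower upper (dietP arr (s + k') - dietP arr s))).sum
          = ((List.range (m - k' + 1)).map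
            (fun s => dietScore lower upper (dietP arr (s + k') - dietP arr s))).sum
            + dietScore lower upper (dietP arr (m + 1) - dietP arr (m - k' + 1)) := by
        rw [hsum, List.range_succ, List.map_append, List.sum_append]
        congr 1
        simp only [List.map_cons, List.map_nil, List.sum_cons, List.sum_nil, add_zero]
        have hidx : (m - k' + 1) + k' = m + 1 := by omega
        rw [hidx]
      rw [hS, hsum]
      simp only [Prod.mk.injEq]
      refine ⟨hw, ?_⟩
      rw [hw]
      unfold dietScore
      split_ifs <;> ring

-- ===== VERDICT =====
theorem diet_plan_spec : Claim_equal_diet_plan := by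
  intro arr k lower upper _ hpre
  obtain ⟨hk0, hkn⟩ := hpre
  unfold Spec_diet_plan
  obtain ⟨k', rfl⟩ := Int.eq_ofNat_of_zero_le hk0
  have hkn' : k' ≤ arr.length := by exact_mod_cast hkn
  have hslice : PySem.List.slice arr (some 0) (some (k' : Int)) = arr.take k' := by
    rw [PySem.List.slice_zero_start, PySem.List.slice_to_natCast]
  have hsc : ∀ s : Int,
      (if s > upper then (1 : Int) else if s < lower then -1 else 0) = dietScore lower upper s :=
    fun _ => rfl
  simp only [diet_plan, diet_plan_alt, hslice, dietP_def, hsc]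
  rw [dietA_fold arr lower upper k' arr.length hkn' le_rfl,
      dietB_fold lower upper _ _ 0, zero_add]
  -- identify B's pyRange-map sum with the range-map sum
  have hb : ((arr.length : Int) - (k' : Int) + 1) = ((arr.length - k' + 1 : Nat) : Int) := by
    push_cast; omega
  rw [hb, PySem.List.pyRange_one (a := 0)]
  simp only [zero_add, Int.sub_zero, Int.toNat_natCast, List.map_map]
  congr 1
  apply List.map_congr_left
  intro s hs
  have hsn : s < arr.length - k' + 1 := List.mem_range.mp hs
  have hc : ((s : Int) + (k' : Int)) = ((s + k' : Nat) : Int) := by push_cast; ring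
  simp only [Function.comp, hc, PySem.List.pyGetD_natCast,
    dietPrefix_getD arr 0 (s + k') (by omega), dietPrefix_getD arr 0 s (by omega), zero_add]
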